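-- pv_equiv track=rewrite | github.com/Jc18Jc/Algorithm | DP/자두나무.py | max_plums
-- ===== SOURCE A (Python) =====
-- def max_plums(T, W, drops):
--     dp = [[[0] * 3 for _ in range(W + 1)] for _ in range(T + 1)]
--     if drops[0] == 1:
--         dp[1][0][1] = 1
--     else:
--         dp[1][1][2] = 1
--     for t in range(2, T + 1):
--         for w in range(W + 1):
--             if drops[t - 1] == 1:
--                 dp[t][w][1] = dp[t - 1][w][1] + 1
--                 if w > 0:
--                     dp[t][w][1] = max(dp[t][w][1], dp[t - 1][w - 1][2] + 1)
--                 dp[t][w][2] = dp[t - 1][w][2]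
--                 if w > 0:
--                     dp[t][w][2] = max(dp[t][w][2], dp[t - 1][w - 1][1])
--             else:
--                 dp[t][w][2] = dp[t - 1][w][2] + 1
--                 if w > 0:
--                     dp[t][w][2] = max(dp[t][w][2], dp[t - 1][w - 1][1] + 1)
--                 dp[t][w][1] = dp[t - 1][w][1]
--                 if w > 0:
--                     dp[t][w][1] = max(dp[t][w][1], dp[t - 1][w - 1][2])
--
--     max_plums = 0
--     for w in range(W + 1):
--         max_plums = max(max_plums, dp[T][w][1], dp[T][w][2])
--     return max_plums
-- ===== SOURCE B (Python) =====
-- # Backward DP: two rolling moves-indexed arrays of suffix values (times t..T),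
-- # combined at the end with the table's time-1 seed row (unseeded states count 0,
-- # as in the original's zero-initialized table).
--
-- def _relax(gm, go, mine, other, W):
--     # one time-step: value at this tree = catch here + best of (stay, arrive from other tree)
--     return [gm + mine[0]] + [max(gm + mine[m], go + other[m - 1]) for m in range(1, W + 1)]
--
-- def max_plums(T, W, drops):
--     first = drops[0]
--     n1 = [0] * (W + 1)
--     n2 = [0] * (W + 1)
--     for g in reversed(drops[1:T]):
--         g1 = 1 if g == 1 else 0
--         g2 = 1 - g1
--         n1, n2 = _relax(g1, g2, n1, n2, W), _relax(g2, g1, n2, n1, W)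
--     best = 0
--     for w in range(W + 1):
--         s1 = 1 if (w == 0 and first == 1) else 0
--         s2 = 1 if (w == 1 and first != 1) else 0
--         best = max(best, s1 + n1[W - w], s2 + n2[W - w])
--     return best
-- ===== Notes on version B (the rewrite author's own statement) =====
-- stated objective: alternative
-- what changed: B replaces A's forward (T+1)x(W+1)x3 table with a backward suffix scan over drops[1:T] keeping two rolling moves-indexed arrays (best catches from time t..T at each tree), combined at the end with the table's time-1 seed row, so the 3D table and its per-cell rewrites disappear.
import Mathlib
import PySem

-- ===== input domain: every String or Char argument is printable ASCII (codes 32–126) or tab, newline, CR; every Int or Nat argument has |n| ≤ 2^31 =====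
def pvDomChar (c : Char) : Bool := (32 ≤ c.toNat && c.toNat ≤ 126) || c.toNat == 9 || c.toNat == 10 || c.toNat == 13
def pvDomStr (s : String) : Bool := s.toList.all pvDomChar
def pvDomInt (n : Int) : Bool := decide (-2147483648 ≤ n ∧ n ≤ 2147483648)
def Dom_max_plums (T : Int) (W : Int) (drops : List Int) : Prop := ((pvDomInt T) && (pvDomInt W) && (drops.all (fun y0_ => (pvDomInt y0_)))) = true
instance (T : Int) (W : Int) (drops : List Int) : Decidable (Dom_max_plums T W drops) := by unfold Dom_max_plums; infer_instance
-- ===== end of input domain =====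

-- B computes the same value by a backward suffix scan with two rolling moves-indexed
-- arrays combined with the table's time-1 seed row, instead of A's forward 3-D table
-- (alternative decomposition, same asymptotic cost).

-- ===== PORT A =====
-- dp[t][w][p] read/write on the nested-list table (indices in range under Pre_)
def pvDget (dp : List (List (List Int))) (t w p : Nat) : Int :=
  ((dp.getD t []).getD w []).getD p 0

def pvDset (dp : List (List (List Int))) (t w p : Nat) (v : Int) : List (List (List Int)) :=
  dp.set t ((dp.getD t []).set w (((dp.getD t []).getD w []).set p v))

-- the body of A's inner 'for w' loop (one cell pair of row t)
def pvInnerBody (drops : List Int) (t : Int) (dp : List (List (List Int))) (w : Int) :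
    List (List (List Int)) :=
  if PySem.List.pyGetD drops (t - 1) 0 = 1 then
    let dp := pvDset dp t.toNat w.toNat 1 (pvDget dp (t - 1).toNat w.toNat 1 + 1)
    let dp := if 0 < w then
        pvDset dp t.toNat w.toNat 1
          (max (pvDget dp t.toNat w.toNat 1) (pvDget dp (t - 1).toNat (w - 1).toNat 2 + 1))
      else dp
    let dp := pvDset dp t.toNat w.toNat 2 (pvDget dp (t - 1).toNat w.toNat 2)
    if 0 < w then
      pvDset dp t.toNat w.toNat 2
        (max (pvDget dp t.toNat w.toNat 2) (pvDget dp (t - 1).toNat (w - 1).toNat 1))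
    else dp
  else
    let dp := pvDset dp t.toNat w.toNat 2 (pvDget dp (t - 1).toNat w.toNat 2 + 1)
    let dp := if 0 < w then
        pvDset dp t.toNat w.toNat 2
          (max (pvDget dp t.toNat w.toNat 2) (pvDget dp (t - 1).toNat (w - 1).toNat 1 + 1))
      else dp
    let dp := pvDset dp t.toNat w.toNat 1 (pvDget dp (t - 1).toNat w.toNat 1)
    if 0 < w then
      pvDset dp t.toNat w.toNat 1
        (max (pvDget dp t.toNat w.toNat 1) (pvDget dp (t - 1).toNat (w - 1).toNat 2))
    else dp

-- A's 'for w in range(W + 1)' loop at second t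
def pvRowLoop (drops : List Int) (W : Int) (dp : List (List (List Int))) (t : Int) :
    List (List (List Int)) :=
  (PySem.List.pyRange 0 (W + 1) 1).foldl (pvInnerBody drops t) dp

def max_plums (T : Int) (W : Int) (drops : List Int) : Int :=
  let dp0 : List (List (List Int)) :=
    List.replicate (T + 1).toNat (List.replicate (W + 1).toNat ([0, 0, 0] : List Int))
  let dp1 :=
    if PySem.List.pyGetD drops 0 0 = 1 then pvDset dp0 1 0 1 1 else pvDset dp0 1 1 2 1
  let dpF := (PySem.List.pyRange 2 (T + 1) 1).foldl (pvRowLoop drops W) dp1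
  (PySem.List.pyRange 0 (W + 1) 1).foldl (fun mp w =>
    max (max mp (pvDget dpF T.toNat w.toNat 1)) (pvDget dpF T.toNat w.toNat 2)) 0

-- ===== PORT B =====
-- one backward time-step of Source B's _relax
def pvRelax (gm go : Int) (mine other : List Int) (W : Int) : List Int :=
  (gm + PySem.List.pyGetD mine 0 0) ::
    (PySem.List.pyRange 1 (W + 1) 1).map (fun m =>
      max (gm + PySem.List.pyGetD mine m 0) (go + PySem.List.pyGetD other (m - 1) 0))

def max_plums_alt (T : Int) (W : Int) (drops : List Int) : Int :=
  let first := PySem.List.pyGetD drops 0 0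
  let zero : List Int := List.replicate (W + 1).toNat 0
  let nn := ((PySem.List.slice drops (some 1) (some T)).reverse).foldl
    (fun (n : List Int × List Int) g =>
      let g1 : Int := if g = 1 then 1 else 0
      let g2 : Int := 1 - g1
      (pvRelax g1 g2 n.1 n.2 W, pvRelax g2 g1 n.2 n.1 W)) (zero, zero)
  (PySem.List.pyRange 0 (W + 1) 1).foldl (fun best w =>
    let s1 : Int := if w = 0 ∧ first = 1 then 1 else 0
    let s2 : Int := if w = 1 ∧ first ≠ 1 then 1 else 0
    max (max best (s1 + PySem.List.pyGetD nn.1 (W - w) 0))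
        (s2 + PySem.List.pyGetD nn.2 (W - w) 0)) 0

-- ===== PRECONDITION & SPEC =====
-- Pre_ excludes exactly the inputs on which the Python A raises (IndexError):
-- T < 1 or T > len(drops) (reads dp[1] / drops[T-1]), W < 0 (empty move axis),
-- and W = 0 with drops[0] != 1 (the seed write dp[1][1][2] needs W >= 1).
def Pre_max_plums (T : Int) (W : Int) (drops : List Int) : Prop :=
  1 ≤ T ∧ T ≤ drops.length ∧ (1 ≤ W ∨ (W = 0 ∧ drops.head? = some 1))
instance (T : Int) (W : Int) (drops : List Int) : Decidable (Pre_max_plums T W drops) := by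
  unfold Pre_max_plums; infer_instance

def pvWitness_max_plums : Int × Int × List Int := (3, 1, [2, 1, 2])

def Spec_max_plums (T : Int) (W : Int) (drops : List Int) (out : Int) : Prop := out = max_plums_alt T W drops
instance (T : Int) (W : Int) (drops : List Int) (out : Int) : Decidable (Spec_max_plums T W drops out) := by unfold Spec_max_plums; infer_instance

-- ===== CLAIM (what is proved, stated in full; the proofs are below) =====
def Claim_equal_max_plums : Prop := ∀ (T : Int) (W : Int) (drops : List Int), Dom_max_plums T W drops → Pre_max_plums T W drops → Spec_max_plums T W drops (max_plums T W drops)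

-- ===== LEMMAS AND PROOFS =====

-- 1 if the plum at second with value g falls at the tree denoted by p (true = tree 1)
def pvCatch (g : Int) (p : Bool) : Int :=
  if p then (if g = 1 then 1 else 0) else (if g = 1 then 0 else 1)

-- value of the suffix of seconds: best catches at position p with ≤ m moves left
def pvV : List Int → Bool → Nat → Int
  | [], _, _ => 0
  | g :: l, p, 0 => pvCatch g p + pvV l p 0
  | g :: l, p, m + 1 => max (pvCatch g p + pvV l p (m + 1)) (pvCatch g (!p) + pvV l (!p) m)

-- A's time-1 row as a function (unseeded states are 0)
def pvSeed (d1 : Int) (w : Nat) (p : Bool) : Int :=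
  if p then (if w = 0 ∧ d1 = 1 then 1 else 0) else (if w = 1 ∧ ¬ d1 = 1 then 1 else 0)

-- A's row transition as a function
def pvStep (g : Int) (R : Nat → Bool → Int) : Nat → Bool → Int :=
  fun w p => pvCatch g p + (if 0 < w then max (R w p) (R (w - 1) (!p)) else R w p)

-- the final combination: max over w ≤ Wn and p of row value + suffix value
def pvMx (R : Nat → Bool → Int) (V : Bool → Nat → Int) (Wn : Nat) : Int :=
  (List.range (Wn + 1)).foldl (fun b w =>
    max (max b (R w true + V true (Wn - w))) (R w false + V false (Wn - w))) 0

-- ----- generic facts about the max-fold -----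
theorem pvFold_init_le (A B : Nat → Int) (L : List Nat) : ∀ b : Int,
    b ≤ L.foldl (fun b w => max (max b (A w)) (B w)) b := by
  induction L with
  | nil => intro b; simp
  | cons x xs ih =>
    intro b
    simp only [List.foldl_cons]
    exact le_trans (le_trans (le_max_left _ _) (le_max_left _ _)) (ih _)

theorem pvFold_mem_le (A B : Nat → Int) (L : List Nat) {w : Nat} (hw : w ∈ L) : ∀ b : Int,
    A w ≤ L.foldl (fun b w => max (max b (A w)) (B w)) b ∧
    B w ≤ L.foldl (fun b w => max (max b (A w)) (B w)) b := by
  induction L with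
  | nil => simp at hw
  | cons x xs ih =>
    intro b
    simp only [List.foldl_cons]
    rcases List.mem_cons.mp hw with h | h
    · subst h
      constructor
      · exact le_trans (le_trans (le_max_right _ _) (le_max_left _ _)) (pvFold_init_le _ _ _ _)
      · exact le_trans (le_max_right _ _) (pvFold_init_le _ _ _ _)
    · exact ih h _

theorem pvFold_le (A B : Nat → Int) (L : List Nat) (c : Int)
    (h : ∀ w ∈ L, A w ≤ c ∧ B w ≤ c) : ∀ b : Int, b ≤ c →
    L.foldl (fun b w => max (max b (A w)) (B w)) b ≤ c := by
  induction L with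
  | nil => intro b hb; simpa
  | cons x xs ih =>
    intro b hb
    simp only [List.foldl_cons]
    refine ih (fun w hw => h w (List.mem_cons_of_mem _ hw)) _ ?_
    have hx := h x (List.mem_cons_self ..)
    exact max_le (max_le hb hx.1) hx.2

theorem pvFold_congr (A B A' B' : Nat → Int) (L : List Nat)
    (h : ∀ w ∈ L, A w = A' w ∧ B w = B' w) : ∀ b : Int,
    L.foldl (fun b w => max (max b (A w)) (B w)) b
      = L.foldl (fun b w => max (max b (A' w)) (B' w)) b := by
  induction L with
  | nil => intro b; rfl
  | cons x xs ih =>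
    intro b
    simp only [List.foldl_cons]
    rw [(h x (List.mem_cons_self ..)).1, (h x (List.mem_cons_self ..)).2]
    exact ih (fun w hw => h w (List.mem_cons_of_mem _ hw)) _

theorem pvMx_nonneg (R : Nat → Bool → Int) (V : Bool → Nat → Int) (Wn : Nat) :
    0 ≤ pvMx R V Wn := pvFold_init_le _ _ _ _

theorem pvMx_term_le (R : Nat → Bool → Int) (V : Bool → Nat → Int) (Wn : Nat)
    {w : Nat} (hw : w ≤ Wn) (p : Bool) :
    R w p + V p (Wn - w) ≤ pvMx R V Wn := by
  have hmem : w ∈ List.range (Wn + 1) := List.mem_range.mpr (by omega)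
  have := pvFold_mem_le (fun w => R w true + V true (Wn - w))
      (fun w => R w false + V false (Wn - w)) (List.range (Wn + 1)) hmem 0
  cases p
  · exact this.2
  · exact this.1

theorem pvMx_le (R : Nat → Bool → Int) (V : Bool → Nat → Int) (Wn : Nat) (c : Int)
    (h0 : 0 ≤ c) (h : ∀ w ≤ Wn, ∀ p, R w p + V p (Wn - w) ≤ c) :
    pvMx R V Wn ≤ c := by
  refine pvFold_le _ _ _ _ (fun w hw => ?_) _ h0
  have hw' : w ≤ Wn := by have := List.mem_range.mp hw; omega
  exact ⟨h w hw' true, h w hw' false⟩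

theorem pvMx_congr (R R' : Nat → Bool → Int) (V V' : Bool → Nat → Int) (Wn : Nat)
    (hR : ∀ w ≤ Wn, ∀ p, R w p = R' w p) (hV : ∀ p, ∀ m ≤ Wn, V p m = V' p m) :
    pvMx R V Wn = pvMx R' V' Wn := by
  refine pvFold_congr _ _ _ _ _ (fun w hw => ?_) _
  have hw' : w ≤ Wn := by have := List.mem_range.mp hw; omega
  exact ⟨by rw [hR w hw', hV true (Wn - w) (by omega)],
         by rw [hR w hw', hV false (Wn - w) (by omega)]⟩

-- ----- the forward/backward exchange -----
theorem pvV_cons_le_stay (g : Int) (l : List Int) (p : Bool) (m : Nat) :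
    pvCatch g p + pvV l p m ≤ pvV (g :: l) p m := by
  cases m with
  | zero => simp [pvV]
  | succ m => exact le_max_left _ _

theorem pvV_cons_le_move (g : Int) (l : List Int) (p : Bool) (m : Nat) :
    pvCatch g p + pvV l p m ≤ pvV (g :: l) (!p) (m + 1) := by
  have : pvCatch g (!(!p)) + pvV l (!(!p)) m ≤ pvV (g :: l) (!p) (m + 1) := le_max_right _ _
  simpa using this

theorem pvExchange (g : Int) (l : List Int) (R : Nat → Bool → Int) (Wn : Nat) :
    pvMx (pvStep g R) (fun p m => pvV l p m) Wn = pvMx R (fun p m => pvV (g :: l) p m) Wn := by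
  apply le_antisymm
  · refine pvMx_le _ _ _ _ (pvMx_nonneg _ _ _) (fun w hw p => ?_)
    by_cases h0 : 0 < w
    · have hsplit : pvStep g R w p + pvV l p (Wn - w)
          = max (pvCatch g p + R w p + pvV l p (Wn - w))
                (pvCatch g p + R (w - 1) (!p) + pvV l p (Wn - w)) := by
        simp only [pvStep, if_pos h0, max_def]
        split_ifs <;> omega
      rw [hsplit]
      apply max_le
      · calc pvCatch g p + R w p + pvV l p (Wn - w)
            = R w p + (pvCatch g p + pvV l p (Wn - w)) := by ring
          _ ≤ R w p + pvV (g :: l) p (Wn - w) := add_le_add le_rfl (pvV_cons_le_stay _ _ _ _)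
          _ ≤ _ := pvMx_term_le _ _ _ hw p
      · have hm : Wn - (w - 1) = (Wn - w) + 1 := by omega
        calc pvCatch g p + R (w - 1) (!p) + pvV l p (Wn - w)
            = R (w - 1) (!p) + (pvCatch g p + pvV l p (Wn - w)) := by ring
          _ ≤ R (w - 1) (!p) + pvV (g :: l) (!p) ((Wn - w) + 1) :=
              add_le_add le_rfl (pvV_cons_le_move _ _ _ _)
          _ = R (w - 1) (!p) + pvV (g :: l) (!p) (Wn - (w - 1)) := by rw [hm]
          _ ≤ _ := pvMx_term_le _ _ _ (by omega) (!p)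
    · have hw0 : w = 0 := by omega
      subst hw0
      simp only [pvStep, if_neg h0]
      calc pvCatch g p + R 0 p + pvV l p (Wn - 0)
          = R 0 p + (pvCatch g p + pvV l p (Wn - 0)) := by ring
        _ ≤ R 0 p + pvV (g :: l) p (Wn - 0) := add_le_add le_rfl (pvV_cons_le_stay _ _ _ _)
        _ ≤ _ := pvMx_term_le _ _ _ (by omega) p
  · refine pvMx_le _ _ _ _ (pvMx_nonneg _ _ _) (fun w hw p => ?_)
    have hstep_ge_stay : ∀ w' p', w' ≤ Wn → pvCatch g p' + R w' p' ≤ pvStep g R w' p' := by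
      intro w' p' _
      simp only [pvStep]
      by_cases h0 : 0 < w'
      · rw [if_pos h0]; exact add_le_add le_rfl (le_max_left _ _)
      · rw [if_neg h0]
    cases hm : Wn - w with
    | zero =>
      rw [show pvV (g :: l) p 0 = pvCatch g p + pvV l p 0 from rfl]
      calc R w p + (pvCatch g p + pvV l p 0)
          = (pvCatch g p + R w p) + pvV l p 0 := by ring
        _ ≤ pvStep g R w p + pvV l p 0 := add_le_add (hstep_ge_stay w p hw) le_rfl
        _ = pvStep g R w p + pvV l p (Wn - w) := by rw [hm]
        _ ≤ _ := pvMx_term_le _ _ _ hw p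
    | succ m =>
      have hv : pvV (g :: l) p (m + 1)
          = max (pvCatch g p + pvV l p (m + 1)) (pvCatch g (!p) + pvV l (!p) m) := rfl
      rw [hv]
      rw [show ∀ a b c : Int, a + max b c = max (a + b) (a + c) from fun a b c => by
        simp only [max_def]; split_ifs <;> omega]
      apply max_le
      · calc R w p + (pvCatch g p + pvV l p (m + 1))
            = (pvCatch g p + R w p) + pvV l p (m + 1) := by ring
          _ ≤ pvStep g R w p + pvV l p (m + 1) := add_le_add (hstep_ge_stay w p hw) le_rfl
          _ = pvStep g R w p + pvV l p (Wn - w) := by rw [hm]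
          _ ≤ _ := pvMx_term_le _ _ _ hw p
      · have hw1 : w + 1 ≤ Wn := by omega
        have hstep : pvCatch g (!p) + R w p ≤ pvStep g R (w + 1) (!p) := by
          simp only [pvStep, if_pos (Nat.succ_pos w)]
          have : R w p ≤ max (R (w + 1) (!p)) (R (w + 1 - 1) (!(!p))) := by
            simp only [Nat.add_sub_cancel, Bool.not_not]
            exact le_max_right _ _
          exact add_le_add le_rfl this
        calc R w p + (pvCatch g (!p) + pvV l (!p) m)
            = (pvCatch g (!p) + R w p) + pvV l (!p) m := by ring
          _ ≤ pvStep g R (w + 1) (!p) + pvV l (!p) m := add_le_add hstep le_rfl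
          _ = pvStep g R (w + 1) (!p) + pvV l (!p) (Wn - (w + 1)) := by
              have : Wn - (w + 1) = m := by omega
              rw [this]
          _ ≤ _ := pvMx_term_le _ _ _ hw1 (!p)

-- folding the step over the whole suffix
theorem pvMain (l : List Int) (Wn : Nat) :
    ∀ R : Nat → Bool → Int,
      pvMx (l.foldl (fun R g => pvStep g R) R) (fun _ _ => 0) Wn
        = pvMx R (fun p m => pvV l p m) Wn := by
  induction l with
  | nil =>
    intro R
    exact pvMx_congr _ _ _ _ _ (fun _ _ _ => rfl) (fun p m _ => by simp [pvV])
  | cons g l ih =>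
    intro R
    simp only [List.foldl_cons]
    rw [ih (pvStep g R)]
    exact pvExchange g l R Wn

theorem pvGetD_replicate_zero (n m : Nat) : (List.replicate n (0 : Int)).getD m 0 = 0 := by
  simp only [List.getD, List.getElem?_replicate]
  split <;> rfl

theorem pvCatch_true (g : Int) : (if g = 1 then (1 : Int) else 0) = pvCatch g true := by
  simp [pvCatch]

theorem pvCatch_false (g : Int) : 1 - (if g = 1 then (1 : Int) else 0) = pvCatch g false := by
  by_cases h : g = 1 <;> simp [pvCatch, h]

theorem pvRelax_getD (g : Int) (p : Bool) (l : List Int) (Wn : Nat) (mine other : List Int)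
    (hm : ∀ m ≤ Wn, mine.getD m 0 = pvV l p m) (ho : ∀ m ≤ Wn, other.getD m 0 = pvV l (!p) m) :
    ∀ m ≤ Wn, (pvRelax (pvCatch g p) (pvCatch g (!p)) mine other ((Wn : Int))).getD m 0
      = pvV (g :: l) p m := by
  intro m hmle
  cases m with
  | zero =>
    show (pvRelax _ _ _ _ _).getD 0 0 = pvV (g :: l) p 0
    unfold pvRelax
    rw [List.getD_cons_zero, PySem.List.pyGetD_zero, hm 0 (by omega)]
    rfl
  | succ k =>
    unfold pvRelax
    rw [List.getD_cons_succ]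
    have hlen : k < ((PySem.List.pyRange 1 ((Wn : Int) + 1) 1).map (fun m =>
        max (pvCatch g p + PySem.List.pyGetD mine m 0)
            (pvCatch g (!p) + PySem.List.pyGetD other (m - 1) 0))).length := by
      rw [List.length_map, PySem.List.length_pyRange_one]
      omega
    rw [List.getD_eq_getElem _ _ hlen, List.getElem_map, PySem.List.getElem_pyRange_one]
    have h1 : (1 : Int) + (k : Int) = ((k + 1 : Nat) : Int) := by push_cast; ring
    rw [h1, PySem.List.pyGetD_natCast]
    rw [show ((k + 1 : Nat) : Int) - 1 = ((k : Nat) : Int) by push_cast; ring]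
    rw [PySem.List.pyGetD_natCast]
    rw [hm (k + 1) hmle, ho k (by omega)]
    rfl

theorem pvB_fold (Wn : Nat) (l : List Int) : ∀ m ≤ Wn,
    (l.reverse.foldl (fun (n : List Int × List Int) g =>
        let g1 : Int := if g = 1 then 1 else 0
        let g2 : Int := 1 - g1
        (pvRelax g1 g2 n.1 n.2 ((Wn : Int)), pvRelax g2 g1 n.2 n.1 ((Wn : Int))))
      (List.replicate (Wn + 1) (0 : Int), List.replicate (Wn + 1) (0 : Int))).1.getD m 0
      = pvV l true m ∧
    (l.reverse.foldl (fun (n : List Int × List Int) g =>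
        let g1 : Int := if g = 1 then 1 else 0
        let g2 : Int := 1 - g1
        (pvRelax g1 g2 n.1 n.2 ((Wn : Int)), pvRelax g2 g1 n.2 n.1 ((Wn : Int))))
      (List.replicate (Wn + 1) (0 : Int), List.replicate (Wn + 1) (0 : Int))).2.getD m 0
      = pvV l false m := by
  rw [List.foldl_reverse]
  induction l with
  | nil =>
    intro m hm
    constructor <;> · simp only [List.foldr_nil]; rw [pvGetD_replicate_zero]; simp [pvV]
  | cons g l ih =>
    intro m hm
    simp only [List.foldr_cons]
    have h1 := fun m hm => (ih m hm).1
    have h2 := fun m hm => (ih m hm).2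
    constructor
    · rw [pvCatch_false g, pvCatch_true g]
      exact pvRelax_getD g true l Wn _ _ h1 (by simpa using h2) m hm
    · rw [pvCatch_false g, pvCatch_true g]
      have := pvRelax_getD g false l Wn _ _ h2 (by simpa using h1) m hm
      simpa using this

-- ----- nested-list table infrastructure -----
def pvShape (dp : List (List (List Int))) (Tn Wn : Nat) : Prop :=
  dp.length = Tn + 1 ∧ ∀ t, t ≤ Tn →
    (dp.getD t []).length = Wn + 1 ∧ ∀ w, w ≤ Wn → ((dp.getD t []).getD w []).length = 3

theorem pvGetD_set {α : Type} (l : List α) (i j : Nat) (a d : α) :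
    (l.set i a).getD j d = if i = j ∧ i < l.length then a else l.getD j d := by
  simp only [List.getD, List.getElem?_set]
  by_cases h1 : i = j
  · subst h1
    by_cases h2 : i < l.length <;> simp [h2]
  · simp [h1]

theorem pvDset_get_self {dp : List (List (List Int))} {Tn Wn : Nat} (hs : pvShape dp Tn Wn)
    {t w p : Nat} (ht : t ≤ Tn) (hw : w ≤ Wn) (hp : p < 3) (v : Int) :
    pvDget (pvDset dp t w p v) t w p = v := by
  have ht' : t < dp.length := by rw [hs.1]; omega
  have hwl : w < (dp.getD t []).length := by rw [(hs.2 t ht).1]; omega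
  have hpl : p < ((dp.getD t []).getD w []).length := by rw [(hs.2 t ht).2 w hw]; omega
  unfold pvDget pvDset
  rw [pvGetD_set, if_pos ⟨rfl, ht'⟩, pvGetD_set, if_pos ⟨rfl, hwl⟩, pvGetD_set, if_pos ⟨rfl, hpl⟩]

theorem pvDset_get_ne {dp : List (List (List Int))} {t w p t' w' p' : Nat}
    (h : t' ≠ t ∨ w' ≠ w ∨ p' ≠ p) (v : Int) :
    pvDget (pvDset dp t w p v) t' w' p' = pvDget dp t' w' p' := by
  unfold pvDget pvDset
  rcases h with h | h | h
  · rw [pvGetD_set, if_neg (fun hc => h hc.1.symm)]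
  · rw [pvGetD_set]
    by_cases hc : t = t' ∧ t < dp.length
    · obtain ⟨heq, hlt⟩ := hc
      subst heq
      rw [if_pos ⟨rfl, hlt⟩, pvGetD_set, if_neg (fun hc2 => h hc2.1.symm)]
    · rw [if_neg hc]
  · rw [pvGetD_set]
    by_cases hc : t = t' ∧ t < dp.length
    · obtain ⟨heq, hlt⟩ := hc
      subst heq
      rw [if_pos ⟨rfl, hlt⟩, pvGetD_set]
      by_cases hc2 : w = w' ∧ w < (dp.getD t []).length
      · obtain ⟨heq2, hlw⟩ := hc2
        subst heq2
        rw [if_pos ⟨rfl, hlw⟩, pvGetD_set, if_neg (fun hc3 => h hc3.1.symm)]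
      · rw [if_neg hc2]
    · rw [if_neg hc]

theorem pvShape_pvDset {dp : List (List (List Int))} {Tn Wn : Nat} (hs : pvShape dp Tn Wn)
    (t w p : Nat) (v : Int) : pvShape (pvDset dp t w p v) Tn Wn := by
  obtain ⟨hl, hr⟩ := hs
  refine ⟨by simpa [pvDset] using hl, fun t' ht' => ?_⟩
  constructor
  · show ((pvDset dp t w p v).getD t' []).length = Wn + 1
    unfold pvDset
    rw [pvGetD_set]
    split_ifs with h
    · obtain ⟨heq, _⟩ := h
      subst heq
      simpa using (hr t ht').1
    · exact (hr t' ht').1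
  · intro w' hw'
    show (((pvDset dp t w p v).getD t' []).getD w' []).length = 3
    unfold pvDset
    rw [pvGetD_set]
    split_ifs with h
    · obtain ⟨heq, _⟩ := h
      subst heq
      rw [pvGetD_set]
      split_ifs with h2
      · obtain ⟨heq2, _⟩ := h2
        subst heq2
        simpa using (hr t ht').2 w hw'
      · exact (hr t ht').2 w' hw'
    · exact (hr t' ht').2 w' hw'

theorem pvGetD_replicate {α : Type} (n m : Nat) (a d : α) :
    (List.replicate n a).getD m d = if m < n then a else d := by
  rw [List.getD_eq_getElem?_getD, List.getElem?_replicate]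
  split_ifs <;> rfl

theorem pvShape_rep (Tn Wn : Nat) :
    pvShape (List.replicate (Tn + 1) (List.replicate (Wn + 1) ([0, 0, 0] : List Int))) Tn Wn := by
  refine ⟨by simp, fun t ht => ?_⟩
  rw [pvGetD_replicate, if_pos (Nat.lt_succ_of_le ht)]
  refine ⟨by simp, fun w hw => ?_⟩
  rw [pvGetD_replicate, if_pos (Nat.lt_succ_of_le hw)]
  rfl

theorem pvDget_rep (Tn Wn t w p : Nat) :
    pvDget (List.replicate (Tn + 1) (List.replicate (Wn + 1) ([0, 0, 0] : List Int))) t w p = 0 := by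
  have h3 : ∀ q : Nat, (([0, 0, 0] : List Int).getD q 0) = 0 := by
    intro q; rcases q with _ | _ | _ | q <;> rfl
  unfold pvDget
  rw [pvGetD_replicate]
  split_ifs
  · rw [pvGetD_replicate]
    split_ifs
    · exact h3 p
    · simp [List.getD]
  · simp [List.getD]

-- ----- the seed row -----
theorem pvRow1_spec (Tn Wn : Nat) (drops : List Int) (h1 : 1 ≤ Tn)
    (hseed : 1 ≤ Wn ∨ drops.getD 0 0 = 1) :
    pvShape (if PySem.List.pyGetD drops 0 0 = 1 then
        pvDset (List.replicate (Tn + 1) (List.replicate (Wn + 1) ([0, 0, 0] : List Int))) 1 0 1 1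
      else pvDset (List.replicate (Tn + 1) (List.replicate (Wn + 1) ([0, 0, 0] : List Int))) 1 1 2 1) Tn Wn ∧
    ∀ w ≤ Wn,
      pvDget (if PySem.List.pyGetD drops 0 0 = 1 then
          pvDset (List.replicate (Tn + 1) (List.replicate (Wn + 1) ([0, 0, 0] : List Int))) 1 0 1 1
        else pvDset (List.replicate (Tn + 1) (List.replicate (Wn + 1) ([0, 0, 0] : List Int))) 1 1 2 1) 1 w 1
        = pvSeed (drops.getD 0 0) w true ∧
      pvDget (if PySem.List.pyGetD drops 0 0 = 1 then
          pvDset (List.replicate (Tn + 1) (List.replicate (Wn + 1) ([0, 0, 0] : List Int))) 1 0 1 1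
        else pvDset (List.replicate (Tn + 1) (List.replicate (Wn + 1) ([0, 0, 0] : List Int))) 1 1 2 1) 1 w 2
        = pvSeed (drops.getD 0 0) w false := by
  rw [PySem.List.pyGetD_zero]
  generalize hg : drops.getD 0 0 = d1 at hseed ⊢
  by_cases hd : d1 = 1
  · simp only [if_pos hd]
    refine ⟨pvShape_pvDset (pvShape_rep Tn Wn) _ _ _ _, fun w hw => ?_⟩
    constructor
    · by_cases hw0 : w = 0
      · subst hw0
        rw [pvDset_get_self (pvShape_rep Tn Wn) (by omega) (by omega) (by omega)]
        simp [pvSeed, hd]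
      · rw [pvDset_get_ne (Or.inr (Or.inl hw0)), pvDget_rep]
        simp [pvSeed, hw0]
    · rw [pvDset_get_ne (Or.inr (Or.inr (by omega))), pvDget_rep]
      simp [pvSeed, hd]
  · simp only [if_neg hd]
    have hW1 : 1 ≤ Wn := by tauto
    refine ⟨pvShape_pvDset (pvShape_rep Tn Wn) _ _ _ _, fun w hw => ?_⟩
    constructor
    · rw [pvDset_get_ne (Or.inr (Or.inr (by omega))), pvDget_rep]
      simp [pvSeed, hd]
    · by_cases hw1 : w = 1
      · subst hw1
        rw [pvDset_get_self (pvShape_rep Tn Wn) (by omega) (by omega) (by omega)]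
        simp [pvSeed, hd]
      · rw [pvDset_get_ne (Or.inr (Or.inl hw1)), pvDget_rep]
        simp [pvSeed, hw1, hd]

-- ----- one iteration of the inner 'for w' loop writes one cell pair of row t -----
theorem pvCatch_t (g : Int) : pvCatch g true = if g = 1 then (1 : Int) else 0 := rfl
theorem pvCatch_f (g : Int) : pvCatch g false = if g = 1 then (0 : Int) else 1 := rfl

theorem pvInnerStep (Tn Wn : Nat) (drops : List Int) (t k : Nat) (ht1 : 1 ≤ t) (htT : t ≤ Tn)
    (hk : k ≤ Wn) (dpk : List (List (List Int))) (hs : pvShape dpk Tn Wn)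
    (R : Nat → Bool → Int)
    (hrow : ∀ w ≤ Wn, pvDget dpk (t - 1) w 1 = R w true ∧ pvDget dpk (t - 1) w 2 = R w false) :
    pvShape (pvInnerBody drops (t : Int) dpk (k : Int)) Tn Wn ∧
    (∀ w p, pvDget (pvInnerBody drops (t : Int) dpk (k : Int)) (t - 1) w p = pvDget dpk (t - 1) w p) ∧
    (∀ w' p, w' ≠ k → pvDget (pvInnerBody drops (t : Int) dpk (k : Int)) t w' p = pvDget dpk t w' p) ∧
    pvDget (pvInnerBody drops (t : Int) dpk (k : Int)) t k 1
      = pvStep (PySem.List.pyGetD drops ((t : Int) - 1) 0) R k true ∧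
    pvDget (pvInnerBody drops (t : Int) dpk (k : Int)) t k 2
      = pvStep (PySem.List.pyGetD drops ((t : Int) - 1) 0) R k false := by
  have htn : ((t : Int)).toNat = t := by omega
  have htm : (((t : Int)) - 1).toNat = t - 1 := by omega
  have hkn : ((k : Int)).toNat = k := by omega
  have hkm : (((k : Int)) - 1).toNat = k - 1 := by omega
  have hne : t - 1 ≠ t := by omega
  have hp12 : (1 : Nat) ≠ 2 := by omega
  have hp21 : (2 : Nat) ≠ 1 := by omega
  unfold pvInnerBody
  simp only [htn, htm, hkn, hkm]
  by_cases hg1 : PySem.List.pyGetD drops ((t : Int) - 1) 0 = 1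
  · simp only [if_pos hg1]
    by_cases hk0 : 0 < k
    · have hkint : (0 : Int) < (k : Int) := by omega
      simp only [if_pos hkint]
      refine ⟨pvShape_pvDset (pvShape_pvDset (pvShape_pvDset (pvShape_pvDset hs _ _ _ _) _ _ _ _) _ _ _ _) _ _ _ _, ?_, ?_, ?_, ?_⟩
      · intro w p
        simp only [pvDset_get_ne (Or.inl hne)]
      · intro w' p hw'
        simp only [pvDset_get_ne (Or.inr (Or.inl hw'))]
      · simp only [pvDset_get_ne (Or.inr (Or.inr hp12))]
        rw [pvDset_get_self (pvShape_pvDset hs _ _ _ _) htT hk (by omega),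
          pvDset_get_self hs htT hk (by omega)]
        simp only [pvDset_get_ne (Or.inl hne)]
        rw [(hrow k hk).1, (hrow (k - 1) (by omega)).2]
        simp only [pvStep, pvCatch_t, pvCatch_f, if_pos hg1, if_pos hk0, if_true, if_false, Bool.not_true, Bool.not_false]
        omega
      · rw [pvDset_get_self (pvShape_pvDset (pvShape_pvDset (pvShape_pvDset hs _ _ _ _) _ _ _ _) _ _ _ _) htT hk (by omega),
          pvDset_get_self (pvShape_pvDset (pvShape_pvDset hs _ _ _ _) _ _ _ _) htT hk (by omega)]
        simp only [pvDset_get_ne (Or.inl hne), pvDset_get_ne (Or.inr (Or.inr hp12))]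
        rw [(hrow k hk).2, (hrow (k - 1) (by omega)).1]
        simp only [pvStep, pvCatch_t, pvCatch_f, if_pos hg1, if_pos hk0, if_true, if_false, Bool.not_true, Bool.not_false]
        omega
    · have hkint : ¬ ((0 : Int) < (k : Int)) := by omega
      simp only [if_neg hkint]
      have hk0' : k = 0 := by omega
      subst hk0'
      refine ⟨pvShape_pvDset (pvShape_pvDset hs _ _ _ _) _ _ _ _, ?_, ?_, ?_, ?_⟩
      · intro w p
        simp only [pvDset_get_ne (Or.inl hne)]
      · intro w' p hw'
        simp only [pvDset_get_ne (Or.inr (Or.inl hw'))]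
      · simp only [pvDset_get_ne (Or.inr (Or.inr hp12))]
        rw [pvDset_get_self hs htT hk (by omega), (hrow 0 hk).1]
        simp only [pvStep, pvCatch_t, pvCatch_f, if_pos hg1, if_neg (lt_irrefl 0), if_true, if_false, Bool.not_true, Bool.not_false]
        omega
      · rw [pvDset_get_self (pvShape_pvDset hs _ _ _ _) htT hk (by omega)]
        simp only [pvDset_get_ne (Or.inl hne)]
        rw [(hrow 0 hk).2]
        simp only [pvStep, pvCatch_t, pvCatch_f, if_pos hg1, if_neg (lt_irrefl 0), if_true, if_false, Bool.not_true, Bool.not_false]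
        omega
  · simp only [if_neg hg1]
    by_cases hk0 : 0 < k
    · have hkint : (0 : Int) < (k : Int) := by omega
      simp only [if_pos hkint]
      refine ⟨pvShape_pvDset (pvShape_pvDset (pvShape_pvDset (pvShape_pvDset hs _ _ _ _) _ _ _ _) _ _ _ _) _ _ _ _, ?_, ?_, ?_, ?_⟩
      · intro w p
        simp only [pvDset_get_ne (Or.inl hne)]
      · intro w' p hw'
        simp only [pvDset_get_ne (Or.inr (Or.inl hw'))]
      · rw [pvDset_get_self (pvShape_pvDset (pvShape_pvDset (pvShape_pvDset hs _ _ _ _) _ _ _ _) _ _ _ _) htT hk (by omega),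
          pvDset_get_self (pvShape_pvDset (pvShape_pvDset hs _ _ _ _) _ _ _ _) htT hk (by omega)]
        simp only [pvDset_get_ne (Or.inl hne), pvDset_get_ne (Or.inr (Or.inr hp21))]
        rw [(hrow k hk).1, (hrow (k - 1) (by omega)).2]
        simp only [pvStep, pvCatch_t, pvCatch_f, if_neg hg1, if_pos hk0, if_true, if_false, Bool.not_true, Bool.not_false]
        omega
      · simp only [pvDset_get_ne (Or.inr (Or.inr hp21))]
        rw [pvDset_get_self (pvShape_pvDset hs _ _ _ _) htT hk (by omega),
          pvDset_get_self hs htT hk (by omega)]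
        simp only [pvDset_get_ne (Or.inl hne)]
        rw [(hrow k hk).2, (hrow (k - 1) (by omega)).1]
        simp only [pvStep, pvCatch_t, pvCatch_f, if_neg hg1, if_pos hk0, if_true, if_false, Bool.not_true, Bool.not_false]
        omega
    · have hkint : ¬ ((0 : Int) < (k : Int)) := by omega
      simp only [if_neg hkint]
      have hk0' : k = 0 := by omega
      subst hk0'
      refine ⟨pvShape_pvDset (pvShape_pvDset hs _ _ _ _) _ _ _ _, ?_, ?_, ?_, ?_⟩
      · intro w p
        simp only [pvDset_get_ne (Or.inl hne)]
      · intro w' p hw'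
        simp only [pvDset_get_ne (Or.inr (Or.inl hw'))]
      · rw [pvDset_get_self (pvShape_pvDset hs _ _ _ _) htT hk (by omega)]
        simp only [pvDset_get_ne (Or.inl hne)]
        rw [(hrow 0 hk).1]
        simp only [pvStep, pvCatch_t, pvCatch_f, if_neg hg1, if_neg (lt_irrefl 0), if_true, if_false, Bool.not_true, Bool.not_false]
        omega
      · simp only [pvDset_get_ne (Or.inr (Or.inr hp21))]
        rw [pvDset_get_self hs htT hk (by omega), (hrow 0 hk).2]
        simp only [pvStep, pvCatch_t, pvCatch_f, if_neg hg1, if_neg (lt_irrefl 0), if_true, if_false, Bool.not_true, Bool.not_false]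
        omega

-- ----- the whole inner loop rewrites row t -----
theorem pvRowLoop_spec (Tn Wn : Nat) (drops : List Int) (t : Nat) (ht1 : 1 ≤ t) (htT : t ≤ Tn)
    (dp : List (List (List Int))) (hs : pvShape dp Tn Wn) (R : Nat → Bool → Int)
    (hrow : ∀ w ≤ Wn, pvDget dp (t - 1) w 1 = R w true ∧ pvDget dp (t - 1) w 2 = R w false) :
    pvShape (pvRowLoop drops (Wn : Int) dp (t : Int)) Tn Wn ∧
    (∀ w ≤ Wn,
      pvDget (pvRowLoop drops (Wn : Int) dp (t : Int)) t w 1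
        = pvStep (PySem.List.pyGetD drops ((t : Int) - 1) 0) R w true ∧
      pvDget (pvRowLoop drops (Wn : Int) dp (t : Int)) t w 2
        = pvStep (PySem.List.pyGetD drops ((t : Int) - 1) 0) R w false) := by
  unfold pvRowLoop
  rw [PySem.List.pyRange_one]
  rw [show (((Wn : Int) + 1) - 0).toNat = Wn + 1 by omega]
  rw [List.foldl_map]
  simp only [zero_add]
  have aux : ∀ n, n ≤ Wn + 1 →
      pvShape ((List.range n).foldl (fun dp (k : Nat) => pvInnerBody drops (t : Int) dp (k : Int)) dp) Tn Wn ∧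
      (∀ w ≤ Wn,
        pvDget ((List.range n).foldl (fun dp (k : Nat) => pvInnerBody drops (t : Int) dp (k : Int)) dp) (t - 1) w 1 = R w true ∧
        pvDget ((List.range n).foldl (fun dp (k : Nat) => pvInnerBody drops (t : Int) dp (k : Int)) dp) (t - 1) w 2 = R w false) ∧
      (∀ w, w < n →
        pvDget ((List.range n).foldl (fun dp (k : Nat) => pvInnerBody drops (t : Int) dp (k : Int)) dp) t w 1
          = pvStep (PySem.List.pyGetD drops ((t : Int) - 1) 0) R w true ∧
        pvDget ((List.range n).foldl (fun dp (k : Nat) => pvInnerBody drops (t : Int) dp (k : Int)) dp) t w 2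
          = pvStep (PySem.List.pyGetD drops ((t : Int) - 1) 0) R w false) := by
    intro n
    induction n with
    | zero =>
      intro _
      exact ⟨hs, hrow, fun w hw => absurd hw (by omega)⟩
    | succ n ih =>
      intro hn
      obtain ⟨ihs, ihrow, ihnew⟩ := ih (by omega)
      rw [List.range_succ, List.foldl_append, List.foldl_cons, List.foldl_nil]
      have hstep := pvInnerStep Tn Wn drops t n ht1 htT (by omega) _ ihs R ihrow
      refine ⟨hstep.1, fun w hw => ?_, fun w hw => ?_⟩
      · rw [hstep.2.1, hstep.2.1]
        exact ihrow w hw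
      · by_cases hwn : w = n
        · subst hwn
          exact ⟨hstep.2.2.2.1, hstep.2.2.2.2⟩
        · rw [hstep.2.2.1 w 1 hwn, hstep.2.2.1 w 2 hwn]
          exact ihnew w (by omega)
  obtain ⟨hsh, _, hnew⟩ := aux (Wn + 1) le_rfl
  exact ⟨hsh, fun w hw => hnew w (by omega)⟩

-- ----- the outer 'for t' loop folds pvStep over the suffix -----
theorem pvOuter (Tn Wn : Nat) (drops : List Int) (ls : List Int) :
    ∀ (t0 : Nat) (dp : List (List (List Int))) (R : Nat → Bool → Int),
      1 ≤ t0 → t0 + ls.length = Tn + 1 → pvShape dp Tn Wn →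
      (∀ w ≤ Wn, pvDget dp (t0 - 1) w 1 = R w true ∧ pvDget dp (t0 - 1) w 2 = R w false) →
      (∀ i : Nat, i < ls.length → PySem.List.pyGetD drops ((t0 : Int) + (i : Int) - 1) 0 = ls.getD i 0) →
      ∀ w ≤ Wn,
        pvDget ((PySem.List.pyRange (t0 : Int) ((Tn : Int) + 1) 1).foldl (pvRowLoop drops (Wn : Int)) dp) Tn w 1
          = (ls.foldl (fun R g => pvStep g R) R) w true ∧
        pvDget ((PySem.List.pyRange (t0 : Int) ((Tn : Int) + 1) 1).foldl (pvRowLoop drops (Wn : Int)) dp) Tn w 2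
          = (ls.foldl (fun R g => pvStep g R) R) w false := by
  induction ls with
  | nil =>
    intro t0 dp R h1 hlen hs hrow hidx w hw
    simp only [List.length_nil, Nat.add_zero] at hlen
    rw [PySem.List.pyRange_one_eq_nil (by omega)]
    simp only [List.foldl_nil]
    have ht0 : t0 - 1 = Tn := by omega
    have := hrow w hw
    rw [ht0] at this
    exact this
  | cons g ls ih =>
    intro t0 dp R h1 hlen hs hrow hidx w hw
    simp only [List.length_cons] at hlen
    have hlt : (t0 : Int) < (Tn : Int) + 1 := by omega
    rw [PySem.List.pyRange_one_cons hlt]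
    simp only [List.foldl_cons]
    have hg : PySem.List.pyGetD drops ((t0 : Int) - 1) 0 = g := by
      have h := hidx 0 (by simp)
      simpa using h
    have hstep := pvRowLoop_spec Tn Wn drops t0 h1 (by omega) dp hs R hrow
    have happ := ih (t0 + 1) (pvRowLoop drops (Wn : Int) dp (t0 : Int)) (pvStep g R)
      (by omega) (by omega) hstep.1
      (fun w' hw' => by
        have h := hstep.2 w' hw'
        rw [hg] at h
        simpa using h)
      (fun i hi => by
        have h := hidx (i + 1) (by simp; omega)
        have hcast : ((t0 : Int) + ((i + 1 : Nat) : Int) - 1) = (((t0 + 1 : Nat)) : Int) + (i : Int) - 1 := by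
          push_cast; ring
        rw [hcast] at h
        simpa using h)
      w hw
    have hc : (((t0 + 1 : Nat)) : Int) = (t0 : Int) + 1 := by push_cast; ring
    rw [hc] at happ
    exact happ

-- ----- the final max loop is pvMx against the zero suffix value -----
theorem pvA_final (Tn Wn : Nat) (dpF : List (List (List Int))) (R : Nat → Bool → Int)
    (hrow : ∀ w ≤ Wn, pvDget dpF Tn w 1 = R w true ∧ pvDget dpF Tn w 2 = R w false) :
    (PySem.List.pyRange 0 ((Wn : Int) + 1) 1).foldl (fun mp w =>
      max (max mp (pvDget dpF ((Tn : Int)).toNat w.toNat 1)) (pvDget dpF ((Tn : Int)).toNat w.toNat 2)) 0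
      = pvMx R (fun _ _ => 0) Wn := by
  rw [PySem.List.pyRange_one, show (((Wn : Int) + 1) - 0).toNat = Wn + 1 by omega, List.foldl_map]
  simp only [pvMx]
  refine pvFold_congr _ _ _ _ _ (fun w hw => ?_) 0
  have hw' : w ≤ Wn := by have := List.mem_range.mp hw; omega
  have h1 : ((0 : Int) + (w : Int)).toNat = w := by omega
  have h2 : ((Tn : Int)).toNat = Tn := by omega
  rw [h1, h2, (hrow w hw').1, (hrow w hw').2]
  constructor <;> simp

theorem max_plums_A_eq (Tn Wn : Nat) (drops : List Int) (h1 : 1 ≤ Tn)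
    (hlen : Tn ≤ drops.length) (hseed : 1 ≤ Wn ∨ drops.getD 0 0 = 1) :
    max_plums (Tn : Int) (Wn : Int) drops
      = pvMx (((drops.drop 1).take (Tn - 1)).foldl (fun R g => pvStep g R) (pvSeed (drops.getD 0 0)))
          (fun _ _ => 0) Wn := by
  have hT1 : (((Tn : Int)) + 1).toNat = Tn + 1 := by omega
  have hW1 : (((Wn : Int)) + 1).toNat = Wn + 1 := by omega
  simp only [max_plums, hT1, hW1]
  have hrow1 := pvRow1_spec Tn Wn drops h1 hseed
  have hlsl : ((drops.drop 1).take (Tn - 1)).length = Tn - 1 := by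
    simp [List.length_take, List.length_drop]
    omega
  have hidx : ∀ i : Nat, i < ((drops.drop 1).take (Tn - 1)).length →
      PySem.List.pyGetD drops (((2 : Nat) : Int) + (i : Int) - 1) 0
        = ((drops.drop 1).take (Tn - 1)).getD i 0 := by
    intro i hi
    rw [hlsl] at hi
    have hc : ((2 : Nat) : Int) + (i : Int) - 1 = ((i + 1 : Nat) : Int) := by push_cast; ring
    rw [hc, PySem.List.pyGetD_natCast]
    rw [List.getD_eq_getElem?_getD, List.getD_eq_getElem?_getD]
    rw [List.getElem?_take_of_lt hi, List.getElem?_drop]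
    rw [Nat.add_comm 1 i]
  have houter := pvOuter Tn Wn drops ((drops.drop 1).take (Tn - 1)) 2
    (if PySem.List.pyGetD drops 0 0 = 1 then
        pvDset (List.replicate (Tn + 1) (List.replicate (Wn + 1) ([0, 0, 0] : List Int))) 1 0 1 1
      else pvDset (List.replicate (Tn + 1) (List.replicate (Wn + 1) ([0, 0, 0] : List Int))) 1 1 2 1)
    (pvSeed (drops.getD 0 0)) (by omega) (by rw [hlsl]; omega) hrow1.1 hrow1.2 hidx
  have hc2 : (((2 : Nat)) : Int) = (2 : Int) := by norm_num
  rw [hc2] at houter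
  exact pvA_final Tn Wn _ _ houter

theorem pvB_final (Wn : Nat) (d1 : Int) (l : List Int) (n1 n2 : List Int)
    (h1 : ∀ m ≤ Wn, n1.getD m 0 = pvV l true m)
    (h2 : ∀ m ≤ Wn, n2.getD m 0 = pvV l false m) :
    (PySem.List.pyRange 0 ((Wn : Int) + 1) 1).foldl (fun best w =>
      max (max best ((if w = 0 ∧ d1 = 1 then (1 : Int) else 0) + PySem.List.pyGetD n1 ((Wn : Int) - w) 0))
          ((if w = 1 ∧ ¬ d1 = 1 then (1 : Int) else 0) + PySem.List.pyGetD n2 ((Wn : Int) - w) 0)) 0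
      = pvMx (pvSeed d1) (fun p m => pvV l p m) Wn := by
  rw [PySem.List.pyRange_one]
  rw [show (((Wn : Int) + 1) - 0).toNat = Wn + 1 by omega]
  rw [List.foldl_map]
  simp only [pvMx]
  refine pvFold_congr _ _ _ _ _ (fun w hw => ?_) 0
  have hww : w ≤ Wn := by have := List.mem_range.mp hw; omega
  have hc : (Wn : Int) - ((0 : Int) + (w : Int)) = ((Wn - w : Nat) : Int) := by omega
  constructor
  · rw [hc, PySem.List.pyGetD_natCast, h1 (Wn - w) (by omega)]
    by_cases hw0 : w = 0 <;> by_cases hd : d1 = 1 <;> simp [pvSeed, hw0, hd]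
  · rw [hc, PySem.List.pyGetD_natCast, h2 (Wn - w) (by omega)]
    by_cases hw0 : w = 1 <;> by_cases hd : d1 = 1 <;> simp [pvSeed, hw0, hd]

theorem max_plums_B_eq (Tn Wn : Nat) (drops : List Int) (h1 : 1 ≤ Tn)
    (_hlen : Tn ≤ drops.length) :
    max_plums_alt (Tn : Int) (Wn : Int) drops
      = pvMx (pvSeed (drops.getD 0 0)) (fun p m => pvV ((drops.drop 1).take (Tn - 1)) p m) Wn := by
  have hWt : (((Wn : Int)) + 1).toNat = Wn + 1 := by omega
  have hslice : PySem.List.slice drops (some 1) (some (Tn : Int)) = (drops.drop 1).take (Tn - 1) := by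
    rw [PySem.List.slice_toNat _ (by omega) (by omega)]
    simp
  simp only [max_plums_alt, hWt, hslice, PySem.List.pyGetD_zero]
  exact pvB_final Wn _ _ _ _
    (fun m hm => (pvB_fold Wn ((drops.drop 1).take (Tn - 1)) m hm).1)
    (fun m hm => (pvB_fold Wn ((drops.drop 1).take (Tn - 1)) m hm).2)

-- ===== VERDICT (by name: the statement is the Claim_ definition above) =====
theorem max_plums_spec : Claim_equal_max_plums := by
  intro T W drops _hDom hPre
  obtain ⟨hT, hlen, hW⟩ := hPre
  have hW0 : 0 ≤ W := by rcases hW with h | ⟨h, _⟩ <;> omega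
  obtain ⟨Tn, rfl⟩ : ∃ n : Nat, T = (n : Int) := ⟨T.toNat, (Int.toNat_of_nonneg (by omega)).symm⟩
  obtain ⟨Wn, rfl⟩ : ∃ n : Nat, W = (n : Int) := ⟨W.toNat, (Int.toNat_of_nonneg hW0).symm⟩
  have h1 : 1 ≤ Tn := by exact_mod_cast hT
  have hlen' : Tn ≤ drops.length := by exact_mod_cast hlen
  have hseed : 1 ≤ Wn ∨ drops.getD 0 0 = 1 := by
    rcases hW with h | ⟨_, hh⟩
    · left; exact_mod_cast h
    · right
      cases drops with
      | nil => simp at hh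
      | cons a l => simp [List.head?] at hh; simp [hh]
  show max_plums _ _ _ = max_plums_alt _ _ _
  rw [max_plums_A_eq Tn Wn drops h1 hlen' hseed, max_plums_B_eq Tn Wn drops h1 hlen',
    pvMain]
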